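-- pv_equiv track=rewrite | github.com/Dicantnik/Python | Lab1Part1/Task3.py | check
-- ===== SOURCE A (Python) =====
-- def check(string):
--     if string[0] in ['+', '-']:
--         return False
--     prev = ''
--     for c in string:
--         if not c.isdigit() and not prev.isdigit():
--             return False
--         elif c in ['*', '/', '%', '^']:
--             return False
--         prev = c
--     return True
-- ===== SOURCE B (Python) =====
-- def check(string):
--     if not string[0].isdigit():
--         return False
--     if any(c in '*/%^' for c in string):
--         return False
--     return all(a.isdigit() or b.isdigit() for a, b in zip(string, string[1:]))
-- ===== Notes on version B (the rewrite author's own statement) =====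
-- stated objective: simpler
-- what changed: Replaced A's single prev-tracking early-return loop by the conjunction of three independent passes: a leading-digit test (which subsumes A's +/- guard), a scan for forbidden operators, and a zip-adjacency check that no two consecutive characters are both non-digits.
import Mathlib
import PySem

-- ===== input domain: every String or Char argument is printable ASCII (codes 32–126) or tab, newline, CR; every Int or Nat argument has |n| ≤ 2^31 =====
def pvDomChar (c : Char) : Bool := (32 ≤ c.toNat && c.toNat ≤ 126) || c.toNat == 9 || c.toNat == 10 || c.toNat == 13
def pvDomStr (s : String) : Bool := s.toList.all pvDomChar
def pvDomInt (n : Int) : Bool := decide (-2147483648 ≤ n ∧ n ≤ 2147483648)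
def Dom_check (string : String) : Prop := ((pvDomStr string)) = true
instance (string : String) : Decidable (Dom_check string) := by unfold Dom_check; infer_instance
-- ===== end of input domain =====

-- B replaces A's single prev-tracking early-return loop by three independent
-- checks (leading digit, no forbidden operator, no two adjacent non-digits);
-- objective: simpler.

-- ===== PORT A =====
-- the for-loop with early returns; prev kept as a String ('' initially, then the last char)
def checkLoop : List Char → String → Bool
  | [], _ => true
  | c :: rest, prev =>
    if !PySem.Chars.isdigit c && !PySem.Str.strIsdigit prev then false
    else if c ∈ ['*', '/', '%', '^'] then false
    else checkLoop rest (String.ofList [c])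

def check (string : String) : Bool :=
  match PySem.Str.pyGet? string 0 with
  | none => false   -- string[0] raises IndexError: excluded by Pre_check
  | some c0 =>
    if c0 ∈ ['+', '-'] then false
    else checkLoop string.toList ""

-- ===== PORT B =====
def check_alt (string : String) : Bool :=
  match PySem.Str.pyGet? string 0 with
  | none => false   -- string[0] raises IndexError: excluded by Pre_check
  | some c0 =>
    if !PySem.Chars.isdigit c0 then false
    else if string.toList.any (fun c => PySem.Chars.isIn [c] "*/%^".toList) then false
    else (string.toList.zip (PySem.Str.slice string (some 1) none).toList).all
          (fun p => PySem.Chars.isdigit p.1 || PySem.Chars.isdigit p.2)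

-- ===== PRECONDITION & SPEC =====
-- Pre_ excludes only the empty string, on which both A and B raise IndexError at string[0].
def Pre_check (string : String) : Prop := string ≠ ""
instance (string : String) : Decidable (Pre_check string) := by unfold Pre_check; infer_instance
def pvWitness_check : String := "12+3"

def Spec_check (string : String) (out : Bool) : Prop := out = check_alt string
instance (string : String) (out : Bool) : Decidable (Spec_check string out) := by unfold Spec_check; infer_instance

-- ===== CLAIM (what is proved, stated in full; the proofs are below) =====
def Claim_equal_check : Prop := ∀ (string : String), Dom_check string → Pre_check string → Spec_check string (check string)

-- ===== LEMMAS AND PROOFS =====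

-- abbreviations used only by the proofs
def pvBad (c : Char) : Bool := c ∈ ['*', '/', '%', '^']

-- adjacency automaton: dp = "previous char was a digit"
def pvZp : Bool → List Char → Bool
  | _, [] => true
  | dp, c :: l => (dp || PySem.Chars.isdigit c) && pvZp (PySem.Chars.isdigit c) l

theorem strIsdigit_singleton (c : Char) :
    PySem.Str.strIsdigit (String.ofList [c]) = PySem.Chars.isdigit c := by
  simp [PySem.Str.strIsdigit, PySem.Chars.strIsdigit]

theorem checkLoop_eq (l : List Char) (prev : String) :
    checkLoop l prev
      = (l.all (fun c => !pvBad c) && pvZp (PySem.Str.strIsdigit prev) l) := by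
  induction l generalizing prev with
  | nil => simp [checkLoop, pvZp]
  | cons c rest ih =>
    have hrec := ih (String.ofList [c])
    rw [strIsdigit_singleton] at hrec
    simp only [checkLoop, pvZp, List.all_cons, hrec]
    by_cases hb : c ∈ ['*', '/', '%', '^']
    · have hbad : pvBad c = true := by simp [pvBad, hb]
      have hd : PySem.Chars.isdigit c = false := by
        have : c = '*' ∨ c = '/' ∨ c = '%' ∨ c = '^' := by simpa using hb
        rcases this with rfl | rfl | rfl | rfl <;> decide
      cases hp : PySem.Str.strIsdigit prev <;> simp [hd, hbad, hb]
    · have hbad : pvBad c = false := by simp [pvBad, hb]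
      have h4 : ¬c = '*' ∧ ¬c = '/' ∧ ¬c = '%' ∧ ¬c = '^' := by simpa using hb
      cases hp : PySem.Str.strIsdigit prev with
      | true =>
        simp [hbad, h4.1, h4.2.1, h4.2.2.1, h4.2.2.2, Bool.and_comm]
      | false =>
        cases hd : PySem.Chars.isdigit c with
        | false => simp
        | true =>
          simp [hbad, h4.1, h4.2.1, h4.2.2.1, h4.2.2.2, Bool.and_comm]

theorem zip_all_eq (rest : List Char) (c : Char) :
    ((c :: rest).zip rest).all (fun p => PySem.Chars.isdigit p.1 || PySem.Chars.isdigit p.2)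
      = pvZp (PySem.Chars.isdigit c) rest := by
  induction rest generalizing c with
  | nil => simp [pvZp]
  | cons c1 r ih => simp [pvZp, ih]

theorem isIn_singleton (c : Char) (l : List Char) :
    PySem.Chars.isIn [c] l = decide (c ∈ l) := by
  cases h : PySem.Chars.isIn [c] l with
  | false =>
    rw [PySem.Chars.isIn_eq_false_iff] at h
    have hm : c ∉ l := fun hmem => by
      rcases List.mem_iff_append.mp hmem with ⟨s, t, rfl⟩
      exact h ⟨s, t, by simp⟩
    simp [hm]
  | true =>
    rw [PySem.Chars.isIn_iff_infix] at h
    have hm : c ∈ l := h.mem (by simp)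
    simp [hm]

-- ===== VERDICT (by name: the statement is the Claim_ definition above) =====
theorem check_spec : Claim_equal_check := by
  intro s _ hpre
  have hne : s.toList ≠ [] := fun h => hpre (by
    cases s; simp at h ⊢; exact h)
  rcases hl : s.toList with _ | ⟨c0, rest⟩
  · exact absurd hl hne
  have hget : PySem.Str.pyGet? s 0 = some c0 := by
    rw [show (0 : Int) = ((0 : Nat) : Int) by norm_num, PySem.Str.pyGet?_natCast, hl]; rfl
  have hslice : (PySem.Str.slice s (some 1) none).toList = rest := by
    simp [PySem.Str.toList_slice, hl, PySem.List.slice]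
  have hpt : ∀ c : Char, PySem.Chars.isIn [c] "*/%^".toList = pvBad c := by
    intro c
    rw [isIn_singleton]
    have hbl : "*/%^".toList = ['*', '/', '%', '^'] := by decide
    rw [hbl]; simp [pvBad]
  have hdig0 : PySem.Str.strIsdigit "" = false := by decide
  unfold Spec_check check check_alt
  rw [hget]
  simp only [hl, hslice, checkLoop_eq, zip_all_eq, hpt, hdig0]
  by_cases hd : PySem.Chars.isdigit c0 = true
  · have hnp : c0 ∉ ['+', '-'] := by
      intro h
      have : c0 = '+' ∨ c0 = '-' := by simpa using h
      rcases this with rfl | rfl <;> exact absurd hd (by decide)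
    have hany : ((c0 :: rest).any pvBad) = !((c0 :: rest).all fun c => !pvBad c) := by
      simp [List.any_eq_not_all_not]
    rw [if_neg hnp, hd, hany]
    cases hall : ((c0 :: rest).all fun c => !pvBad c) <;> simp [pvZp, hd]
  · have hd' : PySem.Chars.isdigit c0 = false := by simpa using hd
    by_cases hp : c0 ∈ ['+', '-'] <;> simp [hp, hd', pvZp]
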